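-- pv_equiv track=rewrite | github.com/CreatorCAMF/DM | beam.py | process
-- ===== SOURCE A (Python) =====
-- def process(element, cat_nombres):
--     genero = []
--     gen = None
--     if element[1] != '':
--         yield [element[0], element[1], element[2]]
--     else:
--         nombre = element[2].split(' ')
--         for x in nombre:
--             for y in cat_nombres:
--                 if x == y[1]:
--                     genero.append(y[3])
--                     break
--         if len(genero) > 0:
--             gen = genero[0]
--         else:
--             gen = None
--         for x in genero:
--             if gen != x and x is not None:
--                 gen = None
--         yield [element[0], gen, element[2]]
-- ===== SOURCE B (Python) =====
-- def process(element, cat_nombres):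
--     if element[1] != '':
--         yield [element[0], element[1], element[2]]
--         return
--     pending = set(element[2].split(' '))
--     genders = set()
--     for y in cat_nombres:
--         if y[1] in pending:
--             pending.remove(y[1])
--             genders.add(y[3])
--     gen = genders.pop() if len(genders) == 1 else None
--     yield [element[0], gen, element[2]]
-- ===== Notes on version B (the rewrite author's own statement) =====
-- stated objective: alternative
-- what changed: B inverts the loop nesting: instead of scanning cat_nombres once per name word (A's nested word-by-category loops plus a demotion pass over the collected gender list), B makes a SINGLE pass over cat_nombres, maintaining a shrinking set of still-unmatched words and a set of distinct genders seen, and yields the gender iff that set is a singleton.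
-- outside the precondition, e.g. on process(['i', '', 'a'], [['q', 'a', 'g', 'M'], ['z']]): A returns [['i', 'M', 'a']], B raises IndexError
import Mathlib
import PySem

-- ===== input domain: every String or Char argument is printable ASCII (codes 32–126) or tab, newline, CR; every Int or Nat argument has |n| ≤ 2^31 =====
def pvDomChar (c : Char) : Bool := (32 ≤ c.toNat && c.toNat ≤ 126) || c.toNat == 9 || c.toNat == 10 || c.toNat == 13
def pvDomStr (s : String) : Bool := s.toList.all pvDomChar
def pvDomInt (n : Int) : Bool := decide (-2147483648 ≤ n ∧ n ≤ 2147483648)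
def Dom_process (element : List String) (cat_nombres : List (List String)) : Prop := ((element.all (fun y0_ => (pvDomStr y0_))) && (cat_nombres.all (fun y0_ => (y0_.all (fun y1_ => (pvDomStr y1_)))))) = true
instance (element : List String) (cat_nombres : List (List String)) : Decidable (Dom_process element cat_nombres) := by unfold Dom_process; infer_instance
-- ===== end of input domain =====

-- B inverts the loop nesting: one pass over cat_nombres with a shrinking set of unmatched
-- words and a set of distinct genders, instead of A's per-word rescans of cat_nombres plus
-- a demotion pass over the gender list (objective: alternative).

-- ===== PORT A =====
-- inner 'for y in cat_nombres: if x == y[1]: genero.append(y[3]); break'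
def processInner (x : String) (cats : List (List String)) (genero : List String) : List String :=
  match cats with
  | [] => genero
  | y :: ys =>
      if x == PySem.List.pyGetD y 1 "" then genero ++ [PySem.List.pyGetD y 3 ""]
      else processInner x ys genero

def process (element : List String) (cat_nombres : List (List String)) : List (List (Option String)) :=
  let e0 := PySem.List.pyGetD element 0 ""
  let e1 := PySem.List.pyGetD element 1 ""
  let e2 := PySem.List.pyGetD element 2 ""
  if e1 ≠ "" then [[some e0, some e1, some e2]]
  else
    let nombre := (PySem.Str.split? e2 " ").getD []
    let genero := nombre.foldl (fun acc x => processInner x cat_nombres acc) []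
    let gen : Option String :=
      if genero.length > 0 then some (PySem.List.pyGetD genero 0 "") else none
    -- 'for x in genero: if gen != x and x is not None: gen = None' (x : String is never None)
    let gen := genero.foldl (fun g x => if g ≠ some x then none else g) gen
    [[some e0, gen, some e2]]

-- ===== PORT B =====
def process_alt (element : List String) (cat_nombres : List (List String)) : List (List (Option String)) :=
  let e0 := PySem.List.pyGetD element 0 ""
  let e1 := PySem.List.pyGetD element 1 ""
  let e2 := PySem.List.pyGetD element 2 ""
  if e1 ≠ "" then [[some e0, some e1, some e2]]
  else
    let pending : PySem.Set String := PySem.Set.ofList ((PySem.Str.split? e2 " ").getD [])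
    let st := cat_nombres.foldl
      (fun (pg : PySem.Set String × PySem.Set String) y =>
        if PySem.Set.contains pg.1 (PySem.List.pyGetD y 1 "")
        then (PySem.Set.discard pg.1 (PySem.List.pyGetD y 1 ""),
              PySem.Set.add pg.2 (PySem.List.pyGetD y 3 ""))
        else pg)
      (pending, PySem.Set.empty)
    -- genders.pop() on a singleton set is its sole element (order-independent)
    let gen : Option String := if st.2.length = 1 then st.2.head? else none
    [[some e0, gen, some e2]]

-- ===== PRECONDITION & SPEC =====
-- Pre_ excludes the inputs where Python A raises IndexError: element shorter than 3, and (in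
-- the gender-lookup branch) category rows shorter than 2, or rows shorter than 4 whose y[1]
-- is a word of the name (A indexes y[3] on a match); it slightly over-excludes rows A never
-- reaches because an earlier row already matched — on those B raises where A returns.
def Pre_process (element : List String) (cat_nombres : List (List String)) : Prop :=
  3 ≤ element.length ∧
  (PySem.List.pyGetD element 1 "" ≠ "" ∨
    ∀ y ∈ cat_nombres, 2 ≤ y.length ∧
      (4 ≤ y.length ∨
        PySem.List.pyGetD y 1 "" ∉ (PySem.Str.split? (PySem.List.pyGetD element 2 "") " ").getD []))
instance (element : List String) (cat_nombres : List (List String)) : Decidable (Pre_process element cat_nombres) := by unfold Pre_process; infer_instance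

def pvWitness_process : List String × List (List String) :=
  (["id1", "", "Ana Maria"], [["1", "Ana", "x", "F"], ["2", "Luis", "x", "M"]])

def Spec_process (element : List String) (cat_nombres : List (List String)) (out : List (List (Option String))) : Prop := out = process_alt element cat_nombres
instance (element : List String) (cat_nombres : List (List String)) (out : List (List (Option String))) : Decidable (Spec_process element cat_nombres out) := by unfold Spec_process; infer_instance

-- ===== CLAIM (what is proved, stated in full; the proofs are below) =====
def Claim_equal_process : Prop := ∀ (element : List String) (cat_nombres : List (List String)), Dom_process element cat_nombres → Pre_process element cat_nombres → Spec_process element cat_nombres (process element cat_nombres)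

-- ===== LEMMAS AND PROOFS =====

-- first-match gender of word x in cats
def fmGen (cats : List (List String)) (x : String) : Option String :=
  (cats.find? (fun y => x == PySem.List.pyGetD y 1 "")).map (fun y => PySem.List.pyGetD y 3 "")

-- A's inner scan returns the appended first-match value (if any).
theorem processInner_eq (x : String) (cats : List (List String)) (genero : List String) :
    processInner x cats genero = genero ++ (fmGen cats x).toList := by
  induction cats with
  | nil => simp [processInner, fmGen]
  | cons y ys ih =>
      cases hb : (x == PySem.List.pyGetD y 1 "") <;>
        simp [processInner, hb, fmGen, List.find?, ih]

-- accumulating foldl of optional appends is a filterMap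
theorem foldl_append_toList (l : List String) (f : String → Option String) (acc : List String) :
    l.foldl (fun acc x => acc ++ (f x).toList) acc = acc ++ l.filterMap f := by
  induction l generalizing acc with
  | nil => simp
  | cons x xs ih =>
      simp only [List.foldl_cons, ih, List.filterMap_cons]
      cases f x <;> simp

theorem genFold_none (l : List String) :
    l.foldl (fun g x => if g ≠ some x then none else g) none = none := by
  induction l with
  | nil => rfl
  | cons x xs ih => simpa using ih

-- A's final demotion loop computes "all equal to the head, else none".
theorem genFold_some (l : List String) (g0 : String) :
    l.foldl (fun g x => if g ≠ some x then none else g) (some g0) =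
      if l.all (fun g => g == g0) then some g0 else none := by
  induction l with
  | nil => rfl
  | cons x xs ih =>
      by_cases h : x = g0
      · subst h; simpa using ih
      · have hx : (some g0 ≠ some x) := by simp [Ne.symm h]
        simp only [List.foldl_cons, if_pos hx, genFold_none, List.all_cons]
        have : (x == g0) = false := by simp [h]
        simp [this]

-- B's single pass: membership of the gender set, and its Nodup invariant.
theorem foldB_mem (cats : List (List String)) (p g : PySem.Set String) (v : String) :
    v ∈ (cats.foldl
      (fun (pg : PySem.Set String × PySem.Set String) y =>
        if PySem.Set.contains pg.1 (PySem.List.pyGetD y 1 "")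
        then (PySem.Set.discard pg.1 (PySem.List.pyGetD y 1 ""),
              PySem.Set.add pg.2 (PySem.List.pyGetD y 3 ""))
        else pg) (p, g)).2 ↔
      v ∈ g ∨ ∃ w ∈ p, fmGen cats w = some v := by
  induction cats generalizing p g with
  | nil => simp [fmGen]
  | cons y ys ih =>
      by_cases hc : PySem.Set.contains p (PySem.List.pyGetD y 1 "") = true
      · have hmem : PySem.List.pyGetD y 1 "" ∈ p := (PySem.Set.contains_iff _ _).mp hc
        simp only [List.foldl_cons, if_pos hc, ih, PySem.Set.mem_add, PySem.Set.mem_discard]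
        constructor
        · rintro (((hg | hv) | ⟨w, ⟨hwp, hwne⟩, hfm⟩))
          · exact Or.inl hg
          · refine Or.inr ⟨PySem.List.pyGetD y 1 "", hmem, ?_⟩
            simp [fmGen, List.find?, hv]
          · refine Or.inr ⟨w, hwp, ?_⟩
            have : (w == PySem.List.pyGetD y 1 "") = false := by simp [hwne]
            simpa [fmGen, List.find?, this] using hfm
        · rintro (hg | ⟨w, hwp, hfm⟩)
          · exact Or.inl (Or.inl hg)
          · by_cases hw : w = PySem.List.pyGetD y 1 ""
            · have : fmGen (y :: ys) w = some (PySem.List.pyGetD y 3 "") := by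
                simp [fmGen, List.find?, hw]
              rw [this] at hfm
              exact Or.inl (Or.inr (Option.some_injective _ hfm).symm)
            · have hb : (w == PySem.List.pyGetD y 1 "") = false := by simp [hw]
              refine Or.inr ⟨w, ⟨hwp, hw⟩, ?_⟩
              simpa [fmGen, List.find?, hb] using hfm
      · have hnm : PySem.List.pyGetD y 1 "" ∉ p := by
          intro h; exact hc ((PySem.Set.contains_iff _ _).mpr h)
        simp only [List.foldl_cons, if_neg hc, ih]
        constructor
        · rintro (hg | ⟨w, hwp, hfm⟩)
          · exact Or.inl hg
          · have hw : w ≠ PySem.List.pyGetD y 1 "" := fun h => hnm (h ▸ hwp)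
            have hb : (w == PySem.List.pyGetD y 1 "") = false := by simp [hw]
            exact Or.inr ⟨w, hwp, by simpa [fmGen, List.find?, hb] using hfm⟩
        · rintro (hg | ⟨w, hwp, hfm⟩)
          · exact Or.inl hg
          · have hw : w ≠ PySem.List.pyGetD y 1 "" := fun h => hnm (h ▸ hwp)
            have hb : (w == PySem.List.pyGetD y 1 "") = false := by simp [hw]
            exact Or.inr ⟨w, hwp, by simpa [fmGen, List.find?, hb] using hfm⟩

theorem foldB_nodup (cats : List (List String)) (p g : PySem.Set String) (hg : g.Nodup) :
    (cats.foldl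
      (fun (pg : PySem.Set String × PySem.Set String) y =>
        if PySem.Set.contains pg.1 (PySem.List.pyGetD y 1 "")
        then (PySem.Set.discard pg.1 (PySem.List.pyGetD y 1 ""),
              PySem.Set.add pg.2 (PySem.List.pyGetD y 3 ""))
        else pg) (p, g)).2.Nodup := by
  induction cats generalizing p g with
  | nil => exact hg
  | cons y ys ih =>
      by_cases hc : PySem.Set.contains p (PySem.List.pyGetD y 1 "") = true
      · simp only [List.foldl_cons, if_pos hc]
        exact ih _ _ (PySem.Set.nodup_add _ _ hg)
      · simp only [List.foldl_cons, if_neg hc]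
        exact ih _ _ hg

-- a Nodup list with no members is empty
theorem set_empty_of_no_mem (S : List String) (hm : ∀ v, v ∈ S ↔ v ∈ ([] : List String)) :
    S = [] := List.eq_nil_iff_forall_not_mem.mpr (fun v hv => by simpa using (hm v).mp hv)

-- a Nodup list whose members are exactly those of g0 :: rest decides A's "all-equal head" test
theorem gen_agree (S : List String) (g0 : String) (rest : List String) (hnd : S.Nodup)
    (hm : ∀ v, v ∈ S ↔ v ∈ g0 :: rest) :
    (if (g0 :: rest).all (fun g => g == g0) then some g0 else none) =
      (if S.length = 1 then S.head? else none) := by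
  by_cases hall : ((g0 :: rest).all (fun g => g == g0)) = true
  · have hSg : ∀ v ∈ S, v = g0 := by
      intro v hv
      have h1 := (hm v).mp hv
      have h2 := (List.all_eq_true.mp hall) v h1
      simpa using h2
    have hg0S : g0 ∈ S := (hm g0).mpr (by simp)
    have hSeq : S = [g0] := by
      cases S with
      | nil => cases hg0S
      | cons a t =>
          have ha : a = g0 := hSg a (by simp)
          subst ha
          have ht : t = [] := by
            cases t with
            | nil => rfl
            | cons b u =>
                have hb : b = a := hSg b (by simp)
                subst hb
                simp at hnd
          simp [ht]
    simp [hSeq, hall]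
  · have hex : ∃ v ∈ rest, v ≠ g0 := by
      by_contra hno
      refine hall (List.all_eq_true.mpr ?_)
      intro v hv
      rcases List.mem_cons.mp hv with h | h
      · simp [h]
      · by_contra hne
        exact hno ⟨v, h, by simpa using hne⟩
    rcases hex with ⟨v, hv, hvne⟩
    have hvS : v ∈ S := (hm v).mpr (by simp [hv])
    have hg0S : g0 ∈ S := (hm g0).mpr (by simp)
    have hlen : S.length ≠ 1 := by
      intro h1
      rcases List.length_eq_one_iff.mp h1 with ⟨a, ha⟩
      subst ha
      simp at hvS hg0S
      exact hvne (hvS.trans hg0S.symm)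
    simp [hall, hlen]

theorem process_eq_alt (element : List String) (cat_nombres : List (List String)) :
    process element cat_nombres = process_alt element cat_nombres := by
  unfold process process_alt
  by_cases h1 : PySem.List.pyGetD element 1 "" = ""
  case neg => simp [h1]
  case pos =>
    rw [if_neg (by simp [h1]), if_neg (by simp [h1])]
    dsimp only
    set words := (PySem.Str.split? (PySem.List.pyGetD element 2 "") " ").getD [] with hw
    set S := (cat_nombres.foldl
      (fun (pg : PySem.Set String × PySem.Set String) y =>
        if PySem.Set.contains pg.1 (PySem.List.pyGetD y 1 "")
        then (PySem.Set.discard pg.1 (PySem.List.pyGetD y 1 ""),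
              PySem.Set.add pg.2 (PySem.List.pyGetD y 3 ""))
        else pg) (PySem.Set.ofList words, PySem.Set.empty)).2 with hSdef
    -- A's genero is words.filterMap (fmGen cat_nombres)
    have hgenero : words.foldl (fun acc x => processInner x cat_nombres acc) [] =
        words.filterMap (fmGen cat_nombres) := by
      have h1' : words.foldl (fun acc x => processInner x cat_nombres acc) [] =
          words.foldl (fun acc x => acc ++ (fmGen cat_nombres x).toList) [] := by
        apply PySem.List.foldl_congr_mem
        intro b a _
        exact processInner_eq a cat_nombres b
      rw [h1', foldl_append_toList]
      simp
    have hSnd : S.Nodup := foldB_nodup cat_nombres (PySem.Set.ofList words) PySem.Set.empty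
      (by simp [PySem.Set.empty])
    have hm : ∀ v, v ∈ S ↔ v ∈ words.filterMap (fmGen cat_nombres) := by
      intro v
      rw [hSdef, foldB_mem cat_nombres (PySem.Set.ofList words) PySem.Set.empty v]
      simp only [PySem.Set.empty, List.not_mem_nil, false_or, List.mem_filterMap,
        PySem.Set.mem_ofList]
    rw [hgenero]
    cases hL : words.filterMap (fmGen cat_nombres) with
    | nil =>
        rw [hL] at hm
        have hS0 : S = [] := set_empty_of_no_mem S hm
        simp [hS0]
    | cons g0 rest =>
        rw [hL] at hm
        have hkey := gen_agree S g0 rest hSnd hm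
        simp only [List.length_cons, Nat.zero_lt_succ, if_pos, List.foldl_cons]
        have h0 : PySem.List.pyGetD (g0 :: rest) 0 "" = g0 := by
          simp [PySem.List.pyGetD_zero_cons]
        rw [h0]
        have hstep : (if (some g0 : Option String) ≠ some g0 then none else some g0) = some g0 := by
          simp
        rw [hstep, genFold_some]
        simp only [List.all_cons, beq_self_eq_true, Bool.true_and] at hkey
        rw [hkey]

-- ===== VERDICT (by name: the statement is the Claim_ definition above) =====
theorem process_spec : Claim_equal_process := by
  intro element cat_nombres _ _
  unfold Spec_process
  exact process_eq_alt element cat_nombres
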